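-- pv_equiv track=rewrite | github.com/mleonelli/CodecademyPlayground | LearnPython/8/Practice-Censor.py | censor
-- ===== SOURCE A (Python) =====
-- def censor(text, word):
--   l = len(word)
--   i = 0
--   censored = ""
--   while i < len(text):
--
--     if(i > len(text) - len(word)):
--       censored += text[i]
--       i += 1
--     else:
--
--       found_at_i = True
--       for j in range(0, l):
--         if(text[i + j] != word[j]):
--           found_at_i = False
--       if(found_at_i == True):
--         censored += '*' * l
--         i += l
--       else:
--         censored += text[i]
--         i += 1
--
--   return censored
-- ===== SOURCE B (Python) =====
-- def censor(text, word):
--   i = 0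
--   out = []
--   while i < len(text):
--     j = text.find(word, i)
--     if j == -1:
--       out.append(text[i:])
--       break
--     out.append(text[i:j])
--     out.append('*' * len(word))
--     i = j + len(word)
--   return ''.join(out)
-- ===== Notes on version B (the rewrite author's own statement) =====
-- stated objective: faster
-- what changed: B iterates over occurrences with text.find(word, i), copying whole untouched spans and star blocks into a list joined once, instead of A's per-character scan that re-compares the whole word (without break) at every index and builds the result by string +=.
import Mathlib
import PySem

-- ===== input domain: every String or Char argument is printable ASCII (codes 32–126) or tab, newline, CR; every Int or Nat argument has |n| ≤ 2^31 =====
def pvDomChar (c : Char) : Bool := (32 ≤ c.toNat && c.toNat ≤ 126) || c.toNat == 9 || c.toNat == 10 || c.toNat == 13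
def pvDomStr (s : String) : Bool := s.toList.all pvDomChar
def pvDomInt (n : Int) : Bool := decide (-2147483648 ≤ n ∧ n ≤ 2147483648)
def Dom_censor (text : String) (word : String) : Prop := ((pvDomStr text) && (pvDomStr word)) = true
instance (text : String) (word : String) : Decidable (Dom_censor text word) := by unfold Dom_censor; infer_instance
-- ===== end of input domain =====

-- B replaces A's char-by-char scan with a find-driven jump over occurrences (alternative decomposition, same return value).

-- ===== PORT A =====
def censorLoopA (t w : List Char) : Nat → Nat → List Char → List Char
  | 0, _, acc => acc
  | fuel + 1, i, acc =>
    if i < t.length then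
      if ((t.length : Int) - (w.length : Int)) < (i : Int) then
        censorLoopA t w fuel (i + 1) (acc ++ [PySem.List.pyGetD t (i : Int) ' '])
      else
        let found := (PySem.List.pyRange 0 (w.length : Int) 1).foldl
          (fun f j => if PySem.List.pyGetD t ((i : Int) + j) ' ' ≠ PySem.List.pyGetD w j ' ' then false else f) true
        if found then
          censorLoopA t w fuel (i + w.length) (acc ++ List.replicate w.length '*')
        else
          censorLoopA t w fuel (i + 1) (acc ++ [PySem.List.pyGetD t (i : Int) ' '])
    else acc

def censor (text : String) (word : String) : String :=
  String.ofList (censorLoopA text.toList word.toList (text.toList.length + 1) 0 [])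

-- ===== PORT B =====
def censorLoopB (t w : List Char) : Nat → Nat → List (List Char) → List (List Char)
  | 0, _, out => out
  | fuel + 1, i, out =>
    if i < t.length then
      let j := PySem.Chars.findFrom t w (i : Int) none
      if j = -1 then out ++ [PySem.List.slice t (some (i : Int)) none]
      else censorLoopB t w fuel (j.toNat + w.length)
        (out ++ [PySem.List.slice t (some (i : Int)) (some j), List.replicate w.length '*'])
    else out

def censor_alt (text : String) (word : String) : String :=
  String.ofList ((censorLoopB text.toList word.toList (text.toList.length + 1) 0 []).flatten)

-- ===== PRECONDITION & SPEC =====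
-- Pre_ excludes word = "" with nonempty text: there A (and B) loops forever (i never advances), so A never returns.
def Pre_censor (text : String) (word : String) : Prop := word = "" → text = ""
instance (text : String) (word : String) : Decidable (Pre_censor text word) := by unfold Pre_censor; infer_instance
def pvWitness_censor : String × String := ("abcab", "ab")

def Spec_censor (text : String) (word : String) (out : String) : Prop := out = censor_alt text word
instance (text : String) (word : String) (out : String) : Decidable (Spec_censor text word out) := by unfold Spec_censor; infer_instance

-- ===== CLAIM (what is proved, stated in full; the proofs are below) =====
def Claim_equal_censor : Prop := ∀ (text : String) (word : String), Dom_censor text word → Pre_censor text word → Spec_censor text word (censor text word)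

-- ===== LEMMAS AND PROOFS =====

-- reference function: the censored tail of t starting at index i (fuel-driven)
def gRef (t w : List Char) : Nat → Nat → List Char
  | 0, _ => []
  | fuel + 1, i =>
    if i < t.length then
      if w <+: t.drop i then
        List.replicate w.length '*' ++ gRef t w fuel (i + w.length)
      else
        t.getD i ' ' :: gRef t w fuel (i + 1)
    else []

lemma gRef_of_le (t w : List Char) (fuel i : Nat) (h : t.length ≤ i) : gRef t w fuel i = [] := by
  cases fuel with
  | zero => rfl
  | succ f => simp [gRef, Nat.not_lt.mpr h]

lemma gRef_stable (t w : List Char) (hw : w ≠ []) :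
    ∀ f1 f2 i, t.length ≤ i + f1 → t.length ≤ i + f2 → gRef t w f1 i = gRef t w f2 i := by
  have hl : 0 < w.length := List.length_pos_iff.mpr hw
  intro f1
  induction f1 with
  | zero =>
    intro f2 i h1 _
    rw [gRef, gRef_of_le t w f2 i (by omega)]
  | succ f1 ih =>
    intro f2 i h1 h2
    by_cases hi : i < t.length
    · cases f2 with
      | zero => omega
      | succ f2 =>
        simp only [gRef, if_pos hi]
        by_cases hpre : w <+: t.drop i
        · rw [if_pos hpre, if_pos hpre, ih f2 (i + w.length) (by omega) (by omega)]
        · rw [if_neg hpre, if_neg hpre, ih f2 (i + 1) (by omega) (by omega)]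
    · rw [gRef_of_le t w _ i (by omega), gRef_of_le t w _ i (by omega)]

lemma no_prefix_of_short (t w : List Char) (i : Nat) (hl : 0 < w.length) (h : t.length < i + w.length) :
    ¬ w <+: t.drop i := by
  intro hpre
  have hle := hpre.length_le
  rw [List.length_drop] at hle
  omega

lemma gRef_no_match (t w : List Char) :
    ∀ fuel i, (∀ k, i ≤ k → ¬ w <+: t.drop k) → t.length ≤ i + fuel → gRef t w fuel i = t.drop i := by
  intro fuel
  induction fuel with
  | zero =>
    intro i _ h
    rw [gRef, eq_comm, List.drop_eq_nil_iff]
    omega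
  | succ f ih =>
    intro i hno h
    by_cases hi : i < t.length
    · rw [gRef, if_pos hi, if_neg (hno i le_rfl), ih (i + 1) (fun k hk => hno k (by omega)) (by omega),
        List.drop_eq_getElem_cons hi, List.getD_eq_getElem t ' ' hi]
    · rw [gRef_of_le t w _ i (by omega), eq_comm, List.drop_eq_nil_iff]
      omega

lemma gRef_first_match (t w : List Char) (hw : w ≠ []) :
    ∀ fuel i j, i ≤ j → w <+: t.drop j → (∀ k, i ≤ k → k < j → ¬ w <+: t.drop k) →
      t.length ≤ i + fuel →
      gRef t w fuel i =
        (t.drop i).take (j - i) ++ List.replicate w.length '*' ++ gRef t w (fuel - (j - i) - 1) (j + w.length) := by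
  have hl : 0 < w.length := List.length_pos_iff.mpr hw
  intro fuel
  induction fuel with
  | zero =>
    intro i j hij hpre _ h
    have hle := hpre.length_le
    rw [List.length_drop] at hle
    omega
  | succ f ih =>
    intro i j hij hpre hmin h
    have hle := hpre.length_le
    rw [List.length_drop] at hle
    have hjl : j + w.length ≤ t.length := by omega
    have hi : i < t.length := by omega
    rcases Nat.eq_or_lt_of_le hij with heq | hlt
    · subst heq
      rw [gRef, if_pos hi, if_pos hpre]
      simp
    · have hstep : ¬ w <+: t.drop i := hmin i le_rfl hlt
      rw [gRef, if_pos hi, if_neg hstep,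
        ih (i + 1) j (by omega) hpre (fun k hk hk' => hmin k (by omega) hk') (by omega)]
      have harith : f - (j - (i + 1)) - 1 = f + 1 - (j - i) - 1 := by omega
      rw [harith]
      have hd : j - i = (j - (i + 1)) + 1 := by omega
      rw [List.drop_eq_getElem_cons hi, hd, List.take_succ_cons, List.getD_eq_getElem t ' ' hi]
      simp

lemma prefix_iff_getD (t w : List Char) (i : Nat) (h : i + w.length ≤ t.length) :
    (w <+: t.drop i) ↔ ∀ k, k < w.length → t.getD (i + k) ' ' = w.getD k ' ' := by
  rw [List.prefix_iff_getElem?]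
  constructor
  · intro hp k hk
    have hik : i + k < t.length := by omega
    have hdk : k < (t.drop i).length := by rw [List.length_drop]; omega
    have h2 := hp k hk
    rw [List.getElem?_eq_getElem hdk] at h2
    rw [List.getD_eq_getElem t ' ' hik, List.getD_eq_getElem w ' ' hk, ← Option.some.inj h2,
      List.getElem_drop]
  · intro hp k hk
    have hik : i + k < t.length := by omega
    have hdk : k < (t.drop i).length := by rw [List.length_drop]; omega
    rw [List.getElem?_eq_getElem hdk]
    have h2 := hp k hk
    rw [List.getD_eq_getElem t ' ' hik, List.getD_eq_getElem w ' ' hk] at h2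
    congr 1
    rw [List.getElem_drop, h2]

lemma foldl_found (t w : List Char) (i : Nat) :
    ∀ (n : Nat) (b : Bool),
      (List.range n).foldl
        (fun f (k : Nat) =>
          if PySem.List.pyGetD t ((i : Int) + (k : Int)) ' ' ≠ PySem.List.pyGetD w ((k : Int)) ' '
          then false else f) b
      = (b && decide (∀ k, k < n → t.getD (i + k) ' ' = w.getD k ' ')) := by
  intro n
  induction n with
  | zero => intro b; simp
  | succ n ih =>
    intro b
    rw [List.range_succ, List.foldl_append, ih, List.foldl_cons, List.foldl_nil]
    have hc : ((i : Int) + (n : Int)) = ((i + n : Nat) : Int) := by push_cast; ring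
    rw [hc, PySem.List.pyGetD_natCast, PySem.List.pyGetD_natCast]
    by_cases hn : t.getD (i + n) ' ' = w.getD n ' '
    · have hiff : (∀ k, k < n + 1 → t.getD (i + k) ' ' = w.getD k ' ')
          ↔ (∀ k, k < n → t.getD (i + k) ' ' = w.getD k ' ') := by
        constructor
        · intro hall k hk; exact hall k (by omega)
        · intro hall k hk
          rcases Nat.lt_succ_iff_lt_or_eq.mp hk with h' | rfl
          · exact hall k h'
          · exact hn
      rw [if_neg (fun hcon => hcon hn), decide_eq_decide.mpr hiff]
    · have hnall : ¬ (∀ k, k < n + 1 → t.getD (i + k) ' ' = w.getD k ' ') := fun hall =>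
        hn (hall n (by omega))
      rw [if_pos hn, decide_eq_false hnall, Bool.and_false]

lemma foundA_eq (t w : List Char) (i : Nat) (h : i + w.length ≤ t.length) :
    ((PySem.List.pyRange 0 (w.length : Int) 1).foldl
      (fun f j => if PySem.List.pyGetD t ((i : Int) + j) ' ' ≠ PySem.List.pyGetD w j ' ' then false else f) true)
    = decide (w <+: t.drop i) := by
  rw [PySem.List.pyRange_one, List.foldl_map]
  simp only [zero_add, Int.sub_zero, Int.toNat_natCast]
  rw [foldl_found t w i w.length true, Bool.true_and]
  exact decide_eq_decide.mpr (prefix_iff_getD t w i h).symm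

lemma loopA_eq (t w : List Char) (hw : w ≠ []) :
    ∀ fuel i acc, t.length ≤ i + fuel → censorLoopA t w fuel i acc = acc ++ gRef t w fuel i := by
  have hl : 0 < w.length := List.length_pos_iff.mpr hw
  intro fuel
  induction fuel with
  | zero => intro i acc h; simp [censorLoopA, gRef]
  | succ f ih =>
    intro i acc h
    by_cases hi : i < t.length
    · rw [censorLoopA, if_pos hi, gRef, if_pos hi]
      by_cases hshort : ((t.length : Int) - (w.length : Int)) < (i : Int)
      · have hnp : ¬ w <+: t.drop i := no_prefix_of_short t w i hl (by omega)
        rw [if_pos hshort, if_neg hnp, ih (i + 1) _ (by omega),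
          PySem.List.pyGetD_natCast, List.getD_eq_getElem t ' ' hi]
        simp
      · have hle : i + w.length ≤ t.length := by omega
        rw [if_neg hshort]
        simp only [foundA_eq t w i hle]
        by_cases hpre : w <+: t.drop i
        · rw [if_pos (decide_eq_true hpre), if_pos hpre, ih (i + w.length) _ (by omega)]
          simp
        · rw [if_neg (by simp [hpre]), if_neg hpre, ih (i + 1) _ (by omega),
            PySem.List.pyGetD_natCast, List.getD_eq_getElem t ' ' hi]
          simp
    · rw [censorLoopA, if_neg hi, gRef, if_neg hi]
      simp

lemma infix_of_prefix_drop (t w : List Char) (i k : Nat) (hik : i ≤ k) (hp : w <+: t.drop k) :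
    w <:+: t.drop i := by
  have hdd : t.drop k = (t.drop i).drop (k - i) := by
    rw [List.drop_drop]
    congr 1
    omega
  rw [hdd] at hp
  exact hp.isInfix.trans (List.drop_suffix _ _).isInfix

lemma loopB_eq (t w : List Char) (hw : w ≠ []) :
    ∀ fuel i out, t.length ≤ i + fuel →
      (censorLoopB t w fuel i out).flatten = out.flatten ++ gRef t w fuel i := by
  have hl : 0 < w.length := List.length_pos_iff.mpr hw
  intro fuel
  induction fuel with
  | zero => intro i out h; simp [censorLoopB, gRef]
  | succ f ih =>
    intro i out h
    by_cases hi : i < t.length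
    · rw [censorLoopB, if_pos hi]
      have hk : i ≤ t.length := le_of_lt hi
      by_cases hj : PySem.Chars.findFrom t w (i : Int) = -1
      · rw [if_pos hj]
        have hninf : ¬ w <:+: t.drop i := (PySem.Chars.findFrom_natCast_eq_neg_one_iff t w i hk).mp hj
        have hno : ∀ k, i ≤ k → ¬ w <+: t.drop k := fun k hik hp =>
          hninf (infix_of_prefix_drop t w i k hik hp)
        rw [gRef_no_match t w (f + 1) i hno (by omega),
          PySem.List.slice_from t (Int.natCast_nonneg i), Int.toNat_natCast]
        simp
      · rw [if_neg hj]
        obtain ⟨hij, hp, hmin⟩ := PySem.Chars.findFrom_natCast_spec t w i hk hj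
        set J := PySem.Chars.findFrom t w (i : Int) with hJ
        have hJ0 : 0 ≤ J := le_trans (Int.natCast_nonneg i) hij
        have hijn : i ≤ J.toNat := by omega
        have hlp := hp.length_le
        rw [List.length_drop] at hlp
        have hjl : J.toNat + w.length ≤ t.length := by omega
        rw [ih (J.toNat + w.length) _ (by omega),
          gRef_first_match t w hw (f + 1) i J.toNat hijn hp (fun k h1 h2 => hmin k h1 h2) (by omega),
          gRef_stable t w hw f (f + 1 - (J.toNat - i) - 1) (J.toNat + w.length) (by omega) (by omega),
          PySem.List.slice_toNat t (Int.natCast_nonneg i) hJ0, Int.toNat_natCast]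
        simp
    · rw [censorLoopB, if_neg hi, gRef, if_neg hi]
      simp

-- ===== VERDICT (by name: the statement is the Claim_ definition above) =====
theorem censor_spec : Claim_equal_censor := by
  intro text word _hdom hpre
  unfold Spec_censor censor censor_alt
  by_cases hw : word.toList = []
  · have hword : word = "" := by
      have : word.toList = String.toList "" := by simpa using hw
      exact String.toList_inj.mp this
    have htext : text = "" := hpre hword
    subst hword htext
    rfl
  · congr 1
    rw [loopA_eq text.toList word.toList hw (text.toList.length + 1) 0 [] (by omega),
      loopB_eq text.toList word.toList hw (text.toList.length + 1) 0 [] (by omega)]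
    simp
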